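-- pv_equiv track=rewrite | github.com/shyam1819/assessments | BCG-X/sawtooth.py | solution
-- ===== SOURCE A (Python) =====
-- def solution(arr):
--     if not arr:
--         return 0
--     total_sawtooth_count = 1
--     current_streak = 1
--
--     for i in range(1,len(arr)):
--         if arr[i]%2 != arr[i-1]%2:
--             current_streak+=1
--         else:
--             current_streak = 1
--         total_sawtooth_count += current_streak
--
--     return total_sawtooth_count
-- ===== SOURCE B (Python) =====
-- def solution(arr):
--     total = 0
--     run = 0
--     prev = 0
--     for x in arr:
--         p = x % 2
--         if run and p != prev:
--             run += 1
--         else: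
--             total += run * (run + 1) // 2
--             run = 1
--         prev = p
--     return total + run * (run + 1) // 2
-- ===== Notes on version B (the rewrite author's own statement) =====
-- stated objective: alternative
-- what changed: B is a single element-wise pass carrying (total, run length, previous parity) that flushes each maximal alternating run's closed-form triangular count L*(L+1)//2 when the parity repeats, instead of A's index loop over range(1,len) that re-adds a growing streak counter at every element.
import Mathlib
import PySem

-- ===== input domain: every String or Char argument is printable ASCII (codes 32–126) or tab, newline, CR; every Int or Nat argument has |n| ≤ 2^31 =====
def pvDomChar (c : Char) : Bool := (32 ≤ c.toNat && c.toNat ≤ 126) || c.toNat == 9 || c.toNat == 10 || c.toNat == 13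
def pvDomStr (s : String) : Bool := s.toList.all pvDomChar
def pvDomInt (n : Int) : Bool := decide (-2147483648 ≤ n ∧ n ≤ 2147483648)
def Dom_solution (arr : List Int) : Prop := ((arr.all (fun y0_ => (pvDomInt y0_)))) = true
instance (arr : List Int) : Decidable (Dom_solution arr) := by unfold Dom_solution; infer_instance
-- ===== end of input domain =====

-- B replaces A's index loop (re-adding a growing streak at each index) with a single
-- element-wise pass over the values, flushing each maximal alternating run's
-- closed-form triangular count when the parity repeats (alternative decomposition, same cost).

-- ===== PORT A =====
-- A: streak accumulator; total starts at 1, adds the current streak at each index.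
def solution (arr : List Int) : Int :=
  if arr = [] then 0
  else
    let st := (PySem.List.pyRange 1 (arr.length : Int) 1).foldl
      (fun (st : Int × Int) i =>
        let s := if PySem.Int.mod (PySem.List.pyGetD arr i 0) 2 ≠
                    PySem.Int.mod (PySem.List.pyGetD arr (i - 1) 0) 2
                 then st.2 + 1 else 1
        (st.1 + s, s)) (1, 1)
    st.1

-- ===== PORT B =====
-- B: one pass over the elements themselves; state = (total, run, prev parity);
-- a repeated parity flushes the finished run's triangular count run*(run+1)//2.
def solution_alt (arr : List Int) : Int :=
  let st := arr.foldl
    (fun (st : Int × Int × Int) x =>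
      let p := PySem.Int.mod x 2
      if st.2.1 ≠ 0 ∧ p ≠ st.2.2
      then (st.1, st.2.1 + 1, p)
      else (st.1 + PySem.Int.floordiv (st.2.1 * (st.2.1 + 1)) 2, 1, p))
    (0, 0, 0)
  st.1 + PySem.Int.floordiv (st.2.1 * (st.2.1 + 1)) 2

-- ===== PRECONDITION & SPEC =====
def Spec_solution (arr : List Int) (out : Int) : Prop := out = solution_alt arr
instance (arr : List Int) (out : Int) : Decidable (Spec_solution arr out) := by unfold Spec_solution; infer_instance

-- ===== CLAIM =====
def Claim_equal_solution : Prop := ∀ (arr : List Int), Dom_solution arr → Spec_solution arr (solution arr)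

-- ===== LEMMAS AND PROOFS =====

def pvTri (L : Int) : Int := PySem.Int.floordiv (L * (L + 1)) 2

lemma pvTri_succ (s : Int) : pvTri (s + 1) = pvTri s + (s + 1) := by
  unfold pvTri
  rw [PySem.Int.floordiv_eq_ediv_of_pos (by omega), PySem.Int.floordiv_eq_ediv_of_pos (by omega)]
  have h : (s + 1) * (s + 1 + 1) = s * (s + 1) + (s + 1) * 2 := by ring
  rw [h, Int.add_mul_ediv_right _ _ (by omega : (2:Int) ≠ 0)]

-- A's index fold, read through the map to adjacent pairs, is a fold over the zip with the tail
lemma pv_map_pairs (a : Int) (rest : List Int) :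
    (PySem.List.pyRange 1 (((a :: rest).length : Int)) 1).map
      (fun i => (PySem.List.pyGetD (a :: rest) (i - 1) 0, PySem.List.pyGetD (a :: rest) i 0))
    = (a :: rest).zip rest := by
  rw [PySem.List.pyRange_one, List.map_map]
  apply List.ext_getElem
  · simp [List.length_zip]
  · intro k h1 h2
    have hkr : k < rest.length := by
      simp [List.length_zip] at h2
      omega
    have hk : k + 1 < (a :: rest).length := by
      simp
      omega
    simp only [List.getElem_map, List.getElem_range, Function.comp_apply, List.getElem_zip]
    have e1 : (1 : Int) + (k : Int) - 1 = ((k : Nat) : Int) := by ring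
    have e2 : (1 : Int) + (k : Int) = (((k + 1 : Nat)) : Int) := by push_cast; ring
    rw [e1, e2, PySem.List.pyGetD_natCast, PySem.List.pyGetD_natCast,
      List.getD_eq_getElem _ _ (by omega), List.getD_eq_getElem _ _ hk]
    exact Prod.ext rfl (by simp)

-- joint invariant: A's running (total, streak) over the pair fold versus B's
-- (flushed total, run, prev parity) over the remaining elements
lemma pv_inv : ∀ (rest : List Int) (last t s tot p : Int), 1 ≤ s →
    p = PySem.Int.mod last 2 →
    t = tot + pvTri s →
    (((last :: rest).zip rest).foldl
      (fun (st : Int × Int) pr =>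
        let s' := if PySem.Int.mod pr.2 2 ≠ PySem.Int.mod pr.1 2 then st.2 + 1 else 1
        (st.1 + s', s')) (t, s)).1
    =
    (let st := rest.foldl
      (fun (st : Int × Int × Int) x =>
        let px := PySem.Int.mod x 2
        if st.2.1 ≠ 0 ∧ px ≠ st.2.2
        then (st.1, st.2.1 + 1, px)
        else (st.1 + PySem.Int.floordiv (st.2.1 * (st.2.1 + 1)) 2, 1, px))
      (tot, s, p)
     st.1 + PySem.Int.floordiv (st.2.1 * (st.2.1 + 1)) 2) := by
  intro rest
  induction rest with
  | nil =>
      intro last t s tot p _ _ ht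
      simpa [pvTri] using ht
  | cons x rs ih =>
      intro last t s tot p hs hp ht
      simp only [List.zip_cons_cons, List.foldl_cons]
      by_cases hc : PySem.Int.mod x 2 ≠ PySem.Int.mod last 2
      · have hbc : (s ≠ 0 ∧ PySem.Int.mod x 2 ≠ p) := ⟨by omega, hp ▸ hc⟩
        rw [if_pos hc, if_pos hbc]
        exact ih x (t + (s + 1)) (s + 1) tot (PySem.Int.mod x 2) (by omega) rfl
          (by rw [ht, pvTri_succ]; ring)
      · have hbc : ¬ (s ≠ 0 ∧ PySem.Int.mod x 2 ≠ p) := by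
          intro hh
          exact hh.2 (hp ▸ (not_not.mp hc))
        rw [if_neg hc, if_neg hbc]
        exact ih x (t + 1) 1 (tot + PySem.Int.floordiv (s * (s + 1)) 2) (PySem.Int.mod x 2)
          (by omega) rfl (by rw [ht]; unfold pvTri; norm_num [PySem.Int.floordiv])

-- ===== VERDICT =====
theorem solution_spec : Claim_equal_solution := by
  intro arr _
  unfold Spec_solution solution solution_alt
  cases arr with
  | nil => norm_num [PySem.Int.floordiv]
  | cons a rest =>
      simp only [if_neg (List.cons_ne_nil a rest)]
      have key : (PySem.List.pyRange 1 (((a :: rest).length : Int)) 1).foldl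
          (fun (st : Int × Int) i =>
            let s := if PySem.Int.mod (PySem.List.pyGetD (a :: rest) i 0) 2 ≠
                        PySem.Int.mod (PySem.List.pyGetD (a :: rest) (i - 1) 0) 2
                     then st.2 + 1 else 1
            (st.1 + s, s)) (1, 1)
          = ((a :: rest).zip rest).foldl
            (fun (st : Int × Int) pr =>
              let s' := if PySem.Int.mod pr.2 2 ≠ PySem.Int.mod pr.1 2 then st.2 + 1 else 1
              (st.1 + s', s')) (1, 1) := by
        rw [← pv_map_pairs a rest, List.foldl_map]
      rw [key]
      have hB0 : (if (0 : Int) ≠ 0 ∧ PySem.Int.mod a 2 ≠ (0 : Int)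
              then ((0 : Int), (0 : Int) + 1, PySem.Int.mod a 2)
              else ((0 : Int) + PySem.Int.floordiv ((0 : Int) * ((0 : Int) + 1)) 2, 1,
                    PySem.Int.mod a 2))
            = ((0 : Int), (1 : Int), PySem.Int.mod a 2) := by
        norm_num [PySem.Int.floordiv]
      simp only [List.foldl_cons, hB0]
      exact pv_inv rest a 1 1 0 (PySem.Int.mod a 2) le_rfl rfl
        (by unfold pvTri; norm_num [PySem.Int.floordiv])
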